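-- pv_equiv track=rewrite | github.com/Freshjelly/zonepoint | fx-discord-news/src/nlp/score.py | calculate_pair_scores
-- ===== SOURCE A (Python) =====
-- from typing import Dict, List
--
-- def calculate_pair_scores(
--
--     text: str,
--     pairs: List[str],
--     currencies: List[str],
--     central_banks: List[str]
-- ) -> Dict[str, int]:
--     """
--     Calculate scores for each currency pair.
--     """
--     if not pairs:
--         return {}
--
--     scores = {}
--     text_upper = text.upper()
--
--     for pair in pairs:
--         score = 0
--
--         # Check direct pair mention
--         if pair in text_upper:
--             score += 50
--
--         # Check individual currency mentions
--         base = pair[:3]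
--         quote = pair[3:]
--
--         base_count = text_upper.count(base)
--         quote_count = text_upper.count(quote)
--
--         score += min(base_count * 10, 30)
--         score += min(quote_count * 10, 30)
--
--         # Check central bank relevance
--         for bank, bank_currencies in [
--             ("FED", ["USD"]), ("FRB", ["USD"]), ("FOMC", ["USD"]),
--             ("ECB", ["EUR"]), ("BOJ", ["JPY"]), ("BOE", ["GBP"]),
--             ("RBA", ["AUD"]), ("BOC", ["CAD"]), ("SNB", ["CHF"]),
--             ("RBNZ", ["NZD"])
--         ]:
--             if bank in central_banks:
--                 if base in bank_currencies:
--                     score += 20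
--                 if quote in bank_currencies:
--                     score += 20
--
--         # Clamp to 0-100
--         scores[pair] = max(0, min(100, score))
--
--     return scores
-- ===== SOURCE B (Python) =====
-- # B: precompute a bank-bonus table from an inverted currency->banks map, then build the
-- # result as a dict comprehension over a per-pair scoring helper (no accumulator loop,
-- # no inner 10-entry bank scan per pair).
--
-- BANKS_BY_CCY = {
--     "USD": ["FED", "FRB", "FOMC"], "EUR": ["ECB"], "JPY": ["BOJ"], "GBP": ["BOE"],
--     "AUD": ["RBA"], "CAD": ["BOC"], "CHF": ["SNB"], "NZD": ["RBNZ"],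
-- }
--
--
-- def _pair_score(text_upper, bonus, pair):
--     base, quote = pair[:3], pair[3:]
--     score = (50 if pair in text_upper else 0) \
--         + min(text_upper.count(base) * 10, 30) \
--         + min(text_upper.count(quote) * 10, 30) \
--         + bonus.get(base, 0) + bonus.get(quote, 0)
--     return max(0, min(100, score))
--
--
-- def calculate_pair_scores(text, pairs, currencies, central_banks):
--     if not pairs:
--         return {}
--     text_upper = text.upper()
--     cb = set(central_banks)
--     bonus = {ccy: 20 * sum(1 for b in banks if b in cb)
--              for ccy, banks in BANKS_BY_CCY.items()}
--     return {pair: _pair_score(text_upper, bonus, pair) for pair in pairs}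
-- ===== Notes on version B (the rewrite author's own statement) =====
-- stated objective: faster
-- what changed: B inverts the fixed bank list into a currency->banks map, precomputes a bank-bonus table once (20 per bank present in set(central_banks)), and builds the result as a dict comprehension over a per-pair scoring helper, replacing A's accumulator loop with an inner 10-entry bank scan (each a linear list search of central_banks) per pair.
import Mathlib
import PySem

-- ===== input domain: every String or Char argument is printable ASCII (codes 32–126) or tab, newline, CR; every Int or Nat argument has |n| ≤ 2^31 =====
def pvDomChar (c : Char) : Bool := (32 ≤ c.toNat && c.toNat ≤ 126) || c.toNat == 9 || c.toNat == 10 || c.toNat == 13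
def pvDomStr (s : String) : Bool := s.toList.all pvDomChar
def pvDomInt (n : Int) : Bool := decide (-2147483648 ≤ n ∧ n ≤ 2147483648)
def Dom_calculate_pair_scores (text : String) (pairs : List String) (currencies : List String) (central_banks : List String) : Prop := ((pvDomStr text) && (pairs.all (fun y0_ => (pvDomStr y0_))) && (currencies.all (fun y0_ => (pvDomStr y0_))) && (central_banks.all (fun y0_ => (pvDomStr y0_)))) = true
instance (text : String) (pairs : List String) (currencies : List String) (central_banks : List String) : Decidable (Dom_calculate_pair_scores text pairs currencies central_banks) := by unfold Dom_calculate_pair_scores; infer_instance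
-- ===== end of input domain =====

-- B precomputes a bank-bonus table from the inverted bank list and builds the result as a
-- dict comprehension over a per-pair scoring helper; return value proved equal on all inputs.

-- ===== PORT A =====
-- the literal bank list A iterates over for every pair
def pvBankList : List (String × List String) :=
  [("FED", ["USD"]), ("FRB", ["USD"]), ("FOMC", ["USD"]),
   ("ECB", ["EUR"]), ("BOJ", ["JPY"]), ("BOE", ["GBP"]),
   ("RBA", ["AUD"]), ("BOC", ["CAD"]), ("SNB", ["CHF"]),
   ("RBNZ", ["NZD"])]

def calculate_pair_scores (text : String) (pairs : List String) (currencies : List String) (central_banks : List String) : List (String × Int) :=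
  if pairs = [] then []
  else
    let text_upper := PySem.Str.upper text
    let scores := pairs.foldl (fun (scores : PySem.Dict String Int) pair =>
      let score : Int := 0
      let score := if PySem.Str.isIn pair text_upper then score + 50 else score
      let base := PySem.Str.slice pair none (some 3)
      let quote := PySem.Str.slice pair (some 3) none
      let base_count := PySem.Str.count text_upper base
      let quote_count := PySem.Str.count text_upper quote
      let score := score + min ((base_count : Int) * 10) 30
      let score := score + min ((quote_count : Int) * 10) 30
      let score := pvBankList.foldl (fun score bc =>
        if central_banks.contains bc.1 then
          let score := if bc.2.contains base then score + 20 else score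
          if bc.2.contains quote then score + 20 else score
        else score) score
      scores.insert pair (max 0 (min 100 score))) PySem.Dict.empty
    scores.items

-- ===== PORT B =====
-- the fixed currency -> central-bank inverted mapping (Source B's BANKS_BY_CCY)
def pvBankMap : List (String × List String) :=
  [("USD", ["FED", "FRB", "FOMC"]), ("EUR", ["ECB"]), ("JPY", ["BOJ"]), ("GBP", ["BOE"]),
   ("AUD", ["RBA"]), ("CAD", ["BOC"]), ("CHF", ["SNB"]), ("NZD", ["RBNZ"])]

-- Source B's _pair_score helper
def pvPairScore (text_upper : String) (bonus : PySem.Dict String Int) (pair : String) : Int :=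
  let base := PySem.Str.slice pair none (some 3)
  let quote := PySem.Str.slice pair (some 3) none
  let score : Int :=
    (if PySem.Str.isIn pair text_upper then (50 : Int) else 0)
    + min ((PySem.Str.count text_upper base : Int) * 10) 30
    + min ((PySem.Str.count text_upper quote : Int) * 10) 30
    + bonus.getD base 0 + bonus.getD quote 0
  max 0 (min 100 score)

def calculate_pair_scores_alt (text : String) (pairs : List String) (currencies : List String) (central_banks : List String) : List (String × Int) :=
  if pairs = [] then []
  else
    let text_upper := PySem.Str.upper text
    let cb : PySem.Set String := PySem.Set.ofList central_banks
    let bonus : PySem.Dict String Int :=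
      PySem.Dict.ofList (pvBankMap.map (fun e =>
        (e.1, 20 * ((e.2.countP (fun b => PySem.Set.contains cb b) : Nat) : Int))))
    (PySem.Dict.ofList (pairs.map (fun pair =>
      (pair, pvPairScore text_upper bonus pair)))).items

-- ===== PRECONDITION & SPEC =====
def Spec_calculate_pair_scores (text : String) (pairs : List String) (currencies : List String) (central_banks : List String) (out : List (String × Int)) : Prop := out = calculate_pair_scores_alt text pairs currencies central_banks
instance (text : String) (pairs : List String) (currencies : List String) (central_banks : List String) (out : List (String × Int)) : Decidable (Spec_calculate_pair_scores text pairs currencies central_banks out) := by unfold Spec_calculate_pair_scores; infer_instance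

-- ===== CLAIM (what is proved, stated in full; the proofs are below) =====
def Claim_equal_calculate_pair_scores : Prop := ∀ (text : String) (pairs : List String) (currencies : List String) (central_banks : List String), Dom_calculate_pair_scores text pairs currencies central_banks → Spec_calculate_pair_scores text pairs currencies central_banks (calculate_pair_scores text pairs currencies central_banks)

-- ===== LEMMAS AND PROOFS =====

-- B's bonus table, named for the proofs
def pvBonus (central_banks : List String) : PySem.Dict String Int :=
  PySem.Dict.ofList (pvBankMap.map (fun e =>
    (e.1, 20 * ((e.2.countP (fun b => PySem.Set.contains (PySem.Set.ofList central_banks) b) : Nat) : Int))))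

theorem pvContains_ofList (l : List String) (x : String) :
    (PySem.Set.ofList l).contains x = l.contains x := by
  simp [PySem.Set.contains_eq_listContains, PySem.Set.mem_ofList]

-- one entry of A's bank loop, written additively
theorem pvStep (p c1 c2 : Bool) (s : Int) :
    (if p then (if c2 then (if c1 then s + 20 else s) + 20 else (if c1 then s + 20 else s)) else s)
    = s + (if p && c1 then 20 else 0) + (if p && c2 then 20 else 0) := by
  cases p <;> cases c1 <;> cases c2 <;> simp

-- the 20-per-present-bank sum for one currency string equals the bonus-table lookup
theorem pvSumBank (cbs : List String) (c : String) :
    ((if cbs.contains "FED" && ["USD"].contains c then (20 : Int) else 0)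
     + (if cbs.contains "FRB" && ["USD"].contains c then 20 else 0)
     + (if cbs.contains "FOMC" && ["USD"].contains c then 20 else 0)
     + (if cbs.contains "ECB" && ["EUR"].contains c then 20 else 0)
     + (if cbs.contains "BOJ" && ["JPY"].contains c then 20 else 0)
     + (if cbs.contains "BOE" && ["GBP"].contains c then 20 else 0)
     + (if cbs.contains "RBA" && ["AUD"].contains c then 20 else 0)
     + (if cbs.contains "BOC" && ["CAD"].contains c then 20 else 0)
     + (if cbs.contains "SNB" && ["CHF"].contains c then 20 else 0)
     + (if cbs.contains "RBNZ" && ["NZD"].contains c then 20 else 0))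
    = (pvBonus cbs).getD c 0 := by
  simp only [pvBonus, pvBankMap, List.map, PySem.Dict.ofList, PySem.Dict.update, List.foldl,
    PySem.Dict.getD_insert, PySem.Dict.getD_empty, pvContains_ofList]
  by_cases h1 : c = "USD"
  · subst h1
    simp only [List.countP_cons, List.countP_nil]
    cases cbs.contains "FED" <;> cases cbs.contains "FRB" <;> cases cbs.contains "FOMC" <;> simp
  by_cases h2 : c = "EUR"
  · subst h2; simp only [List.countP_cons, List.countP_nil]
    cases cbs.contains "ECB" <;> simp
  by_cases h3 : c = "JPY"
  · subst h3; simp only [List.countP_cons, List.countP_nil]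
    cases cbs.contains "BOJ" <;> simp
  by_cases h4 : c = "GBP"
  · subst h4; simp only [List.countP_cons, List.countP_nil]
    cases cbs.contains "BOE" <;> simp
  by_cases h5 : c = "AUD"
  · subst h5; simp only [List.countP_cons, List.countP_nil]
    cases cbs.contains "RBA" <;> simp
  by_cases h6 : c = "CAD"
  · subst h6; simp only [List.countP_cons, List.countP_nil]
    cases cbs.contains "BOC" <;> simp
  by_cases h7 : c = "CHF"
  · subst h7; simp only [List.countP_cons, List.countP_nil]
    cases cbs.contains "SNB" <;> simp
  by_cases h8 : c = "NZD"
  · subst h8; simp only [List.countP_cons, List.countP_nil]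
    cases cbs.contains "RBNZ" <;> simp
  · simp [h1, h2, h3, h4, h5, h6, h7, h8]

-- A's inner bank loop equals two bonus-table lookups added to the running score
theorem pvBankLoop (cbs : List String) (base quote : String) (s : Int) :
    pvBankList.foldl (fun score bc =>
        if cbs.contains bc.1 then
          let score := if bc.2.contains base then score + 20 else score
          if bc.2.contains quote then score + 20 else score
        else score) s
    = s + (pvBonus cbs).getD base 0 + (pvBonus cbs).getD quote 0 := by
  simp only [pvBankList, List.foldl, pvStep]
  linarith [pvSumBank cbs base, pvSumBank cbs quote]

-- Dict.ofList of a mapped list fuses into a foldl-insert over the original list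
theorem pvOfList_map {α : Type} (l : List α) (f : α → String × Int) :
    PySem.Dict.ofList (l.map f)
      = l.foldl (fun (d : PySem.Dict String Int) a => d.insert (f a).1 (f a).2) PySem.Dict.empty := by
  simp [PySem.Dict.ofList, PySem.Dict.update, List.foldl_map]

-- ===== VERDICT (by name: the statement is the Claim_ definition above) =====
theorem calculate_pair_scores_spec : Claim_equal_calculate_pair_scores := by
  intro text pairs currencies central_banks _
  unfold Spec_calculate_pair_scores
  by_cases hp : pairs = []
  · simp [calculate_pair_scores, calculate_pair_scores_alt, hp]
  · simp only [calculate_pair_scores, calculate_pair_scores_alt, if_neg hp, pvOfList_map]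
    congr 1
    apply List.foldl_ext
    intro d pair _
    rw [pvBankLoop]
    simp only [pvPairScore, pvBonus, zero_add, pvOfList_map]
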